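-- pv_equiv track=rewrite | github.com/NicholasKobald/snake2017-2018 | app/shared.py | prefer_biggest_food_clusters
-- ===== SOURCE A (Python) =====
-- def prefer_biggest_food_clusters(move_dict):
--     moves_to_biggest_cluster, cur_biggest_cluster_size = [], 0
--     for move, path_lengths in move_dict.items():
--         cur_cluster_size = len(path_lengths)
--         if cur_biggest_cluster_size < cur_cluster_size:
--             cur_biggest_cluster_size = cur_cluster_size
--             moves_to_biggest_cluster = [move]
--         elif cur_biggest_cluster_size == cur_cluster_size:
--             moves_to_biggest_cluster.append(move)
--     return moves_to_biggest_cluster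
-- ===== SOURCE B (Python) =====
-- def prefer_biggest_food_clusters(move_dict):
--     if not move_dict:
--         return []
--     m = max(len(p) for p in move_dict.values())
--     return [move for move, p in move_dict.items() if len(p) == m]
-- ===== Notes on version B (the rewrite author's own statement) =====
-- stated objective: idiomatic
-- what changed: Replaced the single running-max loop that rebuilds/extends the result list in place with an explicit max() over cluster sizes followed by a separate filtering comprehension.
import Mathlib
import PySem

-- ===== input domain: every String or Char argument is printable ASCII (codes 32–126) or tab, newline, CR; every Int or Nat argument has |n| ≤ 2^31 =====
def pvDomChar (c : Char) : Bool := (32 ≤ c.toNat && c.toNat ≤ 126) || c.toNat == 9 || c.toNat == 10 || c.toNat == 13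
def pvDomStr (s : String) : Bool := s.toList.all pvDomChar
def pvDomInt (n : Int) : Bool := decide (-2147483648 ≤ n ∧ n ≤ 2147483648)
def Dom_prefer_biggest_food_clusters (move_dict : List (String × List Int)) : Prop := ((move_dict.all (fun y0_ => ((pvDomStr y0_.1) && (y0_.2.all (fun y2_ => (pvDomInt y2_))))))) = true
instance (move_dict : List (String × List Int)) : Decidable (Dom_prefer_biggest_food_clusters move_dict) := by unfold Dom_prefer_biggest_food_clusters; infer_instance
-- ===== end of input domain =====

-- B replaces A's running-max loop (rebuild/append result as the max evolves) with an explicit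
-- max over cluster sizes followed by a separate filtering pass (idiomatic; same O(n) cost).

-- ===== PORT A =====
-- A's loop: state (moves_to_biggest_cluster, cur_biggest_cluster_size), three branches in order.
def pbfcLoopA (l : List (String × List Int)) (acc : List String) (cur : Nat) : List String :=
  match l with
  | [] => acc
  | (move, path_lengths) :: t =>
    let cur_cluster_size := path_lengths.length
    if cur < cur_cluster_size then pbfcLoopA t [move] cur_cluster_size
    else if cur = cur_cluster_size then pbfcLoopA t (acc ++ [move]) cur
    else pbfcLoopA t acc cur

def prefer_biggest_food_clusters (move_dict : List (String × List Int)) : List String :=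
  pbfcLoopA move_dict [] 0

-- ===== PORT B =====
def prefer_biggest_food_clusters_alt (move_dict : List (String × List Int)) : List String :=
  if move_dict.isEmpty then []
  else
    let m := (move_dict.map (fun kv => kv.2.length)).foldl Nat.max 0
    (move_dict.filter (fun kv => kv.2.length == m)).map Prod.fst

-- ===== PRECONDITION & SPEC =====
def Spec_prefer_biggest_food_clusters (move_dict : List (String × List Int)) (out : List String) : Prop := out = prefer_biggest_food_clusters_alt move_dict
instance (move_dict : List (String × List Int)) (out : List String) : Decidable (Spec_prefer_biggest_food_clusters move_dict out) := by unfold Spec_prefer_biggest_food_clusters; infer_instance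

-- ===== CLAIM (what is proved, stated in full; the proofs are below) =====
def Claim_equal_prefer_biggest_food_clusters : Prop := ∀ (move_dict : List (String × List Int)), Dom_prefer_biggest_food_clusters move_dict → Spec_prefer_biggest_food_clusters move_dict (prefer_biggest_food_clusters move_dict)

-- ===== LEMMAS AND PROOFS =====

/-- The maximum cluster size seen, starting from `cur`. -/
def pbfcMx (l : List (String × List Int)) (cur : Nat) : Nat :=
  l.foldl (fun c kv => Nat.max c kv.2.length) cur

theorem pbfcMx_cons (m : String) (p : List Int) (t : List (String × List Int)) (cur : Nat) :
    pbfcMx ((m, p) :: t) cur = pbfcMx t (Nat.max cur p.length) := rfl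

theorem le_pbfcMx (l : List (String × List Int)) (cur : Nat) : cur ≤ pbfcMx l cur := by
  induction l generalizing cur with
  | nil => exact le_refl _
  | cons h t ih =>
    calc cur ≤ Nat.max cur h.2.length := Nat.le_max_left _ _
    _ ≤ pbfcMx t (Nat.max cur h.2.length) := ih _
    _ = pbfcMx ((h.1, h.2) :: t) cur := rfl

set_option maxRecDepth 4000 in
/-- Characterisation of A's loop: it returns the (possibly discarded) accumulator followed by
the keys of entries whose length equals the overall maximum. -/
theorem pbfcLoopA_eq (l : List (String × List Int)) (acc : List String) (cur : Nat) :
    pbfcLoopA l acc cur =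
      (if pbfcMx l cur = cur then acc else []) ++
        (l.filter (fun kv => kv.2.length == pbfcMx l cur)).map Prod.fst := by
  induction l generalizing acc cur with
  | nil => simp [pbfcLoopA, pbfcMx]
  | cons h t ih =>
    obtain ⟨m, p⟩ := h
    simp only [pbfcLoopA, pbfcMx_cons]
    rcases Nat.lt_trichotomy cur p.length with hlt | heq | hgt
    · have hmx : Nat.max cur p.length = p.length := Nat.max_eq_right (Nat.le_of_lt hlt)
      rw [if_pos hlt, ih]
      simp only [hmx]
      have hM : cur < pbfcMx t p.length := lt_of_lt_of_le hlt (le_pbfcMx _ _)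
      have h1 : ¬ (pbfcMx t p.length = cur) := by omega
      simp only [if_neg h1, List.filter_cons]
      by_cases h2 : p.length = pbfcMx t p.length
      · simp [← h2]
      · have : ¬ (pbfcMx t p.length = p.length) := fun h => h2 h.symm
        simp [h2, this]
    · subst heq
      have hms : Nat.max p.length p.length = p.length := Nat.max_self _
      rw [if_neg (lt_irrefl _), if_pos rfl]
      simp only [hms]
      rw [ih]
      by_cases h1 : pbfcMx t p.length = p.length
      · simp [h1]
      · have h2 : ¬ (p.length = pbfcMx t p.length) := fun h => h1 h.symm
        simp [h1, h2]
    · have h1 : ¬ (cur < p.length) := by omega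
      have h2 : ¬ (cur = p.length) := by omega
      have hmx : Nat.max cur p.length = cur := Nat.max_eq_left (Nat.le_of_lt hgt)
      rw [if_neg h1, if_neg h2]
      simp only [hmx]
      rw [ih]
      have h3 : ¬ (p.length = pbfcMx t cur) := by
        have := le_pbfcMx t cur; omega
      simp [h3]

theorem pbfcMx_eq_fold (l : List (String × List Int)) :
    (l.map (fun kv => kv.2.length)).foldl Nat.max 0 = pbfcMx l 0 := by
  simp [pbfcMx, List.foldl_map]

-- ===== VERDICT (by name: the statement is the Claim_ definition above) =====
theorem prefer_biggest_food_clusters_spec : Claim_equal_prefer_biggest_food_clusters := by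
  intro l _
  unfold Spec_prefer_biggest_food_clusters prefer_biggest_food_clusters prefer_biggest_food_clusters_alt
  rw [pbfcLoopA_eq]
  simp only [ite_self, List.nil_append, ← pbfcMx_eq_fold]
  cases l with
  | nil => rfl
  | cons h t => rfl
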